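-- pv_equiv track=rewrite | github.com/mira0993/algorithms_and_linux_overview | Python/InterviewPractice/number_str_repr.py | get_partial_str
-- ===== SOURCE A (Python) =====
-- str_repr = {
--     '0': 'zero',
--     '1': 'one',
--     '2': 'two',
--     '3': 'three',
--     '4': 'four',
--     '5': 'five',
--     '6': 'six',
--     '7': 'seven',
--     '8': 'eight',
--     '9': 'nine',
--     '10': 'ten',
--     '11': 'eleven',
--     '12': 'twelve',
--     '13': 'thirteen',
--     '14': 'thirteen',
--     '15': 'thirteen',
--     '16': 'thirteen',
--     '17': 'thirteen',
--     '18': 'thirteen',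
--     '19': 'thirteen',
--     '20': 'twenty',
--     '30': 'thirty',
--     '40': 'fourty',
--     '50': 'fifty',
--     '60': 'sixty',
--     '70': 'seventy',
--     '80': 'eighty',
--     '90': 'ninty',
-- }
--
-- def get_partial_str(arr, count):
--     UNIT = 0
--     TEN = 1
--     HUNDRED = 2
--     partial = ''
--     for i in range(len(arr)):
--         if arr[i] == '0':
--             continue
--         elif i == UNIT:
--             partial = str_repr[arr[i]]
--         elif i == TEN:
--             num = arr[i]+arr[i-1]
--             if num in str_repr:
--                 partial = str_repr[num]
--             else:
--                 partial = str_repr[arr[i]+'0'] + ' ' + partial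
--         elif i == HUNDRED:
--             partial = str_repr[arr[i]] + ' hundred ' + partial
--
--     if count % 2 == 0:
--         partial += ' thousand, '
--     if count == 3:
--         partial += ' million, '
--     return partial
-- ===== SOURCE B (Python) =====
-- _SMALL = ('zero one two three four five six seven eight nine ten eleven twelve '
--           'thirteen thirteen thirteen thirteen thirteen thirteen thirteen').split()
-- _TENS = 'zero ten twenty thirty fourty fifty sixty seventy eighty ninty'.split()
--
--
-- def _words(n):
--     """English words for 0 <= n <= 999 (with the module's teen/typo spellings),
--     by recursion on the magnitude of n."""
--     if n >= 100:
--         rest = n % 100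
--         return _SMALL[n // 100] + ' hundred ' + (_words(rest) if rest else '')
--     if n >= 20:
--         rest = n % 10
--         return _TENS[n // 10] + (' ' + _SMALL[rest] if rest else '')
--     return _SMALL[n]
--
--
-- def get_partial_str(arr, count):
--     n = sum(int(d) * 10 ** i for i, d in enumerate(arr[:3]))
--     out = _words(n) if n else ''
--     if count % 2 == 0:
--         out += ' thousand, '
--     if count == 3:
--         out += ' million, '
--     return out
-- ===== Notes on version B (the rewrite author's own statement) =====
-- stated objective: alternative
-- what changed: B first folds the (up to three) digit strings into one integer n via positional weights and then produces the words by a recursive magnitude decomposition of n (n>=100 emits the hundreds word and recurses on n%100, n>=20 splits with divmod by 10, else a direct small-number word), replacing A's index-dispatch loop with string-keyed dict lookups.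
-- outside the precondition, e.g. on get_partial_str(['5', '', '7'], 1): A returns 'seven hundred five', B raises ValueError; on get_partial_str(['10', '2'], 1): A returns 'twenty ten', B returns 'thirty'; on get_partial_str(['0', '0', '20'], 1): A returns 'twenty hundred ', B raises IndexError
import Mathlib
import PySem

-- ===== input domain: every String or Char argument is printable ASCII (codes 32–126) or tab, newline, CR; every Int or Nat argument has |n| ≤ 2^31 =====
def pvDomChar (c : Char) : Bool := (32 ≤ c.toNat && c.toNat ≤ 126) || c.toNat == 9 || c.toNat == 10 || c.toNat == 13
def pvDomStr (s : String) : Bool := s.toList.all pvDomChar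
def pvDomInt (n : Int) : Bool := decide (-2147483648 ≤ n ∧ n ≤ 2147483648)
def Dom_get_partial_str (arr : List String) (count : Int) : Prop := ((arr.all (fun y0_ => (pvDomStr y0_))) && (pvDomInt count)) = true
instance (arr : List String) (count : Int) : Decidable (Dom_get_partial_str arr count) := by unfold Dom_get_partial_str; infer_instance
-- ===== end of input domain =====

-- B folds the digits into one integer and renders it by recursive magnitude decomposition
-- (hundreds → recurse on n % 100 → tens via divmod), instead of A's index-dispatch loop
-- with string-keyed dict lookups (objective: alternative algorithm, same cost).

-- ===== PORT A =====
-- A-side helper: the module-level dict str_repr (with its teen/typo quirks, verbatim)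
def pvStrRepr : PySem.Dict String String := PySem.Dict.ofList
  [("0", "zero"), ("1", "one"), ("2", "two"), ("3", "three"), ("4", "four"),
   ("5", "five"), ("6", "six"), ("7", "seven"), ("8", "eight"), ("9", "nine"),
   ("10", "ten"), ("11", "eleven"), ("12", "twelve"), ("13", "thirteen"),
   ("14", "thirteen"), ("15", "thirteen"), ("16", "thirteen"), ("17", "thirteen"),
   ("18", "thirteen"), ("19", "thirteen"), ("20", "twenty"), ("30", "thirty"),
   ("40", "fourty"), ("50", "fifty"), ("60", "sixty"), ("70", "seventy"),
   ("80", "eighty"), ("90", "ninty")]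

-- A-side helper: the body of A's 'for i in range(len(arr))' loop (dict lookups via getD:
-- the default is unreached under Pre_, where Python's str_repr[...] would raise KeyError)
def pvBodyA (arr : List String) (partial_ : String) (i : Int) : String :=
  let ai := PySem.List.pyGetD arr i ""
  if ai = "0" then partial_
  else if i = 0 then pvStrRepr.getD ai ""
  else if i = 1 then
    let num := ai ++ PySem.List.pyGetD arr (i - 1) ""
    match pvStrRepr.get? num with
    | some v => v
    | none => pvStrRepr.getD (ai ++ "0") "" ++ " " ++ partial_
  else if i = 2 then pvStrRepr.getD ai "" ++ " hundred " ++ partial_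
  else partial_

def get_partial_str (arr : List String) (count : Int) : String :=
  let partial_ := (PySem.List.pyRange 0 (arr.length : Int) 1).foldl (pvBodyA arr) ""
  let partial_ := if PySem.Int.mod count 2 = 0 then partial_ ++ " thousand, " else partial_
  let partial_ := if count = 3 then partial_ ++ " million, " else partial_
  partial_

-- ===== PORT B =====
def pvSmall : List String :=
  ["zero", "one", "two", "three", "four", "five", "six", "seven", "eight", "nine",
   "ten", "eleven", "twelve", "thirteen", "thirteen", "thirteen", "thirteen",
   "thirteen", "thirteen", "thirteen"]
def pvTensB : List String :=
  ["zero", "ten", "twenty", "thirty", "fourty", "fifty", "sixty", "seventy", "eighty", "ninty"]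

-- Source B's _words, recursion on the magnitude of n; the extra fuel argument only makes the
-- recursion structural (depth is at most 2: hundreds → rest; fuel 2 is never exhausted on
-- the calls get_partial_str_alt makes). List indexing via pyGetD, // and % via PySem.Int.
def pvWordsB : Nat → Int → String
  | 0, _ => ""
  | Nat.succ fuel, n =>
    if n ≥ 100 then
      let rest := PySem.Int.mod n 100
      PySem.List.pyGetD pvSmall (PySem.Int.floordiv n 100) "" ++ " hundred " ++
        (if rest ≠ 0 then pvWordsB fuel rest else "")
    else if n ≥ 20 then
      let rest := PySem.Int.mod n 10
      PySem.List.pyGetD pvTensB (PySem.Int.floordiv n 10) "" ++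
        (if rest ≠ 0 then " " ++ PySem.List.pyGetD pvSmall rest "" else "")
    else PySem.List.pyGetD pvSmall n ""

-- int(d) ported as PySem.Int.ofStr? (the .getD 0 default is unreached under Pre_, where
-- Python's int() would raise ValueError); 10 ** i is exact since enumerate indices are ≥ 0.
def get_partial_str_alt (arr : List String) (count : Int) : String :=
  let n := (PySem.List.enumerate (PySem.List.slice arr none (some 3)) 0).foldl
    (fun acc p => acc + (PySem.Int.ofStr? p.2).getD 0 * (10 : Int) ^ p.1.toNat) 0
  let out := if n ≠ 0 then pvWordsB 2 n else ""
  let out := if PySem.Int.mod count 2 = 0 then out ++ " thousand, " else out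
  let out := if count = 3 then out ++ " million, " else out
  out

-- ===== PRECONDITION & SPEC =====
def pvDigits : List String := ["0", "1", "2", "3", "4", "5", "6", "7", "8", "9"]

-- all keys of str_repr, and the keys usable in the hundreds position ('0'-'19')
def pvKeys : List String :=
  ["0", "1", "2", "3", "4", "5", "6", "7", "8", "9", "10", "11", "12", "13", "14",
   "15", "16", "17", "18", "19", "20", "30", "40", "50", "60", "70", "80", "90"]
def pvHKeys : List String :=
  ["0", "1", "2", "3", "4", "5", "6", "7", "8", "9", "10", "11", "12", "13", "14",
   "15", "16", "17", "18", "19"]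

-- Pre_ admits exactly the digit-group shapes on which the two programs agree: the first
-- three elements are str_repr keys, the tens position is a single digit, the hundreds
-- position is at most a teen key, and a multi-digit units element forces a zero tens digit.
-- It excludes inputs where A raises KeyError, inputs where A's concatenated-key lookup
-- returns an accidental word (e.g. ['10','2'] -> 'twenty ten', or arr[1] = '' naming
-- arr[0]'s word) while B computes from the numeric value, and inputs where B's int() or
-- word-table indexing would raise (see claim cites). Elements past index 2 are unconstrained.
def Pre_get_partial_str (arr : List String) (count : Int) : Prop :=
  (∀ s ∈ arr.take 3, s ∈ pvKeys) ∧
  (∀ s ∈ (arr.drop 2).take 1, s ∈ pvHKeys) ∧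
  (∀ s ∈ (arr.drop 1).take 1, s ∈ pvDigits) ∧
  ((∀ s ∈ arr.take 1, s ∈ pvDigits) ∨ (∀ s ∈ (arr.drop 1).take 1, s = "0"))
instance (arr : List String) (count : Int) : Decidable (Pre_get_partial_str arr count) := by
  unfold Pre_get_partial_str; infer_instance

def pvWitness_get_partial_str : List String × Int := (["5", "2", "3"], 3)

def Spec_get_partial_str (arr : List String) (count : Int) (out : String) : Prop := out = get_partial_str_alt arr count
instance (arr : List String) (count : Int) (out : String) : Decidable (Spec_get_partial_str arr count out) := by unfold Spec_get_partial_str; infer_instance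

-- ===== CLAIM (what is proved, stated in full; the proofs are below) =====
def Claim_equal_get_partial_str : Prop := ∀ (arr : List String) (count : Int), Dom_get_partial_str arr count → Pre_get_partial_str arr count → Spec_get_partial_str arr count (get_partial_str arr count)

-- ===== LEMMAS AND PROOFS =====

-- both ports share the count-suffix shape: equal cores give equal results
theorem pvSuffix_congr (x y : String) (count : Int) (hxy : x = y) :
    ((if count = 3 then (if PySem.Int.mod count 2 = 0 then x ++ " thousand, " else x) ++ " million, "
      else (if PySem.Int.mod count 2 = 0 then x ++ " thousand, " else x))
     = (if count = 3 then (if PySem.Int.mod count 2 = 0 then y ++ " thousand, " else y) ++ " million, "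
      else (if PySem.Int.mod count 2 = 0 then y ++ " thousand, " else y))) := by
  rw [hxy]

-- A's loop body is the identity for every index ≥ 3
theorem pvBodyA_id (arr : List String) (s : String) (i : Int) (hi : 3 ≤ i) :
    pvBodyA arr s i = s := by
  unfold pvBodyA
  have h0 : i ≠ 0 := by omega
  have h1 : i ≠ 1 := by omega
  have h2 : i ≠ 2 := by omega
  simp [h0, h1, h2]

theorem pvFoldA_id (arr : List String) (l : List Int) (hl : ∀ i ∈ l, 3 ≤ i) (s : String) :
    l.foldl (pvBodyA arr) s = s := by
  induction l generalizing s with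
  | nil => rfl
  | cons x xs ih =>
    simp only [List.foldl_cons]
    rw [pvBodyA_id arr s x (hl x (by simp)), ih (fun i hi => hl i (by simp [hi]))]

-- A's loop body at indices 0, 1, 2 only reads the first three elements
theorem pvBodyA_cong0 (a b c s : String) (rest : List String) :
    pvBodyA (a :: b :: c :: rest) s 0 = pvBodyA [a, b, c] s 0 := by
  unfold pvBodyA; simp [pysem]

theorem pvBodyA_cong1 (a b c s : String) (rest : List String) :
    pvBodyA (a :: b :: c :: rest) s 1 = pvBodyA [a, b, c] s 1 := by
  unfold pvBodyA; simp [pysem]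

theorem pvBodyA_cong2 (a b c s : String) (rest : List String) :
    pvBodyA (a :: b :: c :: rest) s 2 = pvBodyA [a, b, c] s 2 := by
  unfold pvBodyA; simp [pysem]

-- core of A (loop result) on a list of length ≥ 3 only runs its first three iterations
theorem pvCoreA_long (a b c : String) (rest : List String) :
    (PySem.List.pyRange 0 ((a :: b :: c :: rest).length : Int) 1).foldl
        (pvBodyA (a :: b :: c :: rest)) ""
      = (PySem.List.pyRange 0 3 1).foldl (pvBodyA (a :: b :: c :: rest)) "" := by
  rw [PySem.List.pyRange_one_append 0 3 ((a :: b :: c :: rest).length : Int)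
        (by omega) (by simp; omega),
      List.foldl_append]
  exact pvFoldA_id _ _ (fun i hi => ((PySem.List.mem_pyRange_one).1 hi).1) _

-- on three-or-longer lists A ignores everything past index 2
theorem pvA_take3 (a b c : String) (rest : List String) (count : Int) :
    get_partial_str (a :: b :: c :: rest) count = get_partial_str [a, b, c] count := by
  unfold get_partial_str
  apply pvSuffix_congr
  rw [pvCoreA_long,
      show PySem.List.pyRange 0 3 1 = [0, 1, 2] from by decide,
      show ((([a, b, c] : List String).length : Nat) : Int) = 3 from by simp,
      show PySem.List.pyRange 0 3 1 = [0, 1, 2] from by decide]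
  simp only [List.foldl_cons, List.foldl_nil]
  rw [pvBodyA_cong0, pvBodyA_cong1, pvBodyA_cong2]

-- so does B (its slice arr[:3] keeps only the first three elements)
theorem pvB_take3 (a b c : String) (rest : List String) (count : Int) :
    get_partial_str_alt (a :: b :: c :: rest) count = get_partial_str_alt [a, b, c] count := by
  unfold get_partial_str_alt
  apply pvSuffix_congr
  rw [show PySem.List.slice (a :: b :: c :: rest) none (some 3) = [a, b, c] from by
        rw [PySem.List.slice_to _ (by omega)]; rfl,
      show PySem.List.slice [a, b, c] none (some 3) = [a, b, c] from by
        rw [PySem.List.slice_to _ (by omega)]; rfl]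


def pvCoreA (arr : List String) : String :=
  (PySem.List.pyRange 0 (arr.length : Int) 1).foldl (pvBodyA arr) ""

def pvCoreB (arr : List String) : String :=
  let n := (PySem.List.enumerate (PySem.List.slice arr none (some 3)) 0).foldl
    (fun acc p => acc + (PySem.Int.ofStr? p.2).getD 0 * (10 : Int) ^ p.1.toNat) 0
  if n ≠ 0 then pvWordsB 2 n else ""

theorem pvA_eq_core (arr : List String) : get_partial_str arr 1 = pvCoreA arr := by
  unfold get_partial_str pvCoreA
  norm_num [show PySem.Int.mod 1 2 = 1 from by decide]

theorem pvB_eq_core (arr : List String) : get_partial_str_alt arr 1 = pvCoreB arr := by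
  unfold get_partial_str_alt pvCoreB
  norm_num [show PySem.Int.mod 1 2 = 1 from by decide]

theorem pvBodyA_congr (arr arr' : List String) (s : String) (i : Int)
    (h : PySem.List.pyGetD arr i "" = PySem.List.pyGetD arr' i "")
    (h' : i = 1 → PySem.List.pyGetD arr (i - 1) "" = PySem.List.pyGetD arr' (i - 1) "") :
    pvBodyA arr s i = pvBodyA arr' s i := by
  by_cases hi : i = 1
  · subst hi; unfold pvBodyA; rw [h, h' rfl]
  · unfold pvBodyA; rw [h]; simp [hi]

theorem pvBodyA_zero2 (arr : List String) (h : PySem.List.pyGetD arr 2 "" = "0") (s : String) :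
    pvBodyA arr s 2 = s := by
  simp only [pvBodyA]; rw [h]; simp

theorem pvBodyA_hundred (arr : List String) (c : String)
    (h : PySem.List.pyGetD arr 2 "" = c) (hc : c ≠ "0") (s : String) :
    pvBodyA arr s 2 = pvStrRepr.getD c "" ++ " hundred " ++ s := by
  simp only [pvBodyA]; rw [h]
  rw [if_neg hc, if_neg (show (2:Int) ≠ 0 by decide), if_neg (show (2:Int) ≠ 1 by decide)]
  simp

theorem pvCoreA_drop0 (a b : String) : pvCoreA [a, b, "0"] = pvCoreA [a, b] := by
  unfold pvCoreA
  rw [show ((([a, b, "0"] : List String).length : Nat) : Int) = 3 from by simp,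
      show ((([a, b] : List String).length : Nat) : Int) = 2 from by simp,
      show PySem.List.pyRange 0 3 1 = [0, 1, 2] from by decide,
      show PySem.List.pyRange 0 2 1 = [0, 1] from by decide]
  simp only [List.foldl_cons, List.foldl_nil]
  rw [pvBodyA_zero2 _ (by rfl),
      show ∀ s, pvBodyA [a, b, "0"] s 0 = pvBodyA [a, b] s 0 from fun s =>
        pvBodyA_congr _ _ s 0 (by rfl) (by omega),
      show ∀ s, pvBodyA [a, b, "0"] s 1 = pvBodyA [a, b] s 1 from fun s =>
        pvBodyA_congr _ _ s 1 (by rfl) (fun _ => by rfl)]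

theorem pvCoreA_hundred (a b c : String) (hc : c ≠ "0") :
    pvCoreA [a, b, c] = pvStrRepr.getD c "" ++ " hundred " ++ pvCoreA [a, b] := by
  unfold pvCoreA
  rw [show ((([a, b, c] : List String).length : Nat) : Int) = 3 from by simp,
      show ((([a, b] : List String).length : Nat) : Int) = 2 from by simp,
      show PySem.List.pyRange 0 3 1 = [0, 1, 2] from by decide,
      show PySem.List.pyRange 0 2 1 = [0, 1] from by decide]
  simp only [List.foldl_cons, List.foldl_nil]
  rw [pvBodyA_hundred _ c (by rfl) hc,
      show ∀ s, pvBodyA [a, b, c] s 0 = pvBodyA [a, b] s 0 from fun s =>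
        pvBodyA_congr _ _ s 0 (by rfl) (by omega),
      show ∀ s, pvBodyA [a, b, c] s 1 = pvBodyA [a, b] s 1 from fun s =>
        pvBodyA_congr _ _ s 1 (by rfl) (fun _ => by rfl)]

-- B-side numeric lemmas
theorem pvWordsB_fuel (n : Int) (hn : n < 100) : pvWordsB 2 n = pvWordsB 1 n := by
  show pvWordsB (Nat.succ 1) n = pvWordsB (Nat.succ 0) n
  simp only [pvWordsB]
  rw [if_neg (show ¬ n ≥ 100 by omega), if_neg (show ¬ n ≥ 100 by omega)]

theorem pvWordsB_hundred (h nab : Int) (h1 : 1 ≤ h)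
    (n0 : 0 ≤ nab) (n99 : nab ≤ 99) :
    pvWordsB 2 (nab + h * 100)
      = PySem.List.pyGetD pvSmall h "" ++ " hundred " ++
        (if nab ≠ 0 then pvWordsB 1 nab else "") := by
  show pvWordsB (Nat.succ 1) _ = _
  simp only [pvWordsB]
  rw [if_pos (show nab + h * 100 ≥ 100 by nlinarith),
      show PySem.Int.floordiv (nab + h * 100) 100 = h from by
        rw [PySem.Int.floordiv_eq_ediv_of_pos (by omega)]; omega,
      show PySem.Int.mod (nab + h * 100) 100 = nab from by
        rw [PySem.Int.mod_eq_emod_of_pos (by omega)]; omega]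

theorem pvCoreB3 (a b c : String) :
    pvCoreB [a, b, c]
      = (if (PySem.Int.ofStr? a).getD 0 + (PySem.Int.ofStr? b).getD 0 * 10
            + (PySem.Int.ofStr? c).getD 0 * 100 ≠ 0
         then pvWordsB 2 ((PySem.Int.ofStr? a).getD 0 + (PySem.Int.ofStr? b).getD 0 * 10
            + (PySem.Int.ofStr? c).getD 0 * 100)
         else "") := by
  unfold pvCoreB
  rw [show PySem.List.slice [a, b, c] none (some 3) = [a, b, c] from by
        rw [PySem.List.slice_to _ (by omega)]; rfl]
  norm_num [PySem.List.enumerate]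
  ring_nf
  norm_num [show Int.toNat 2 = 2 from rfl]

theorem pvCoreB2 (a b : String) :
    pvCoreB [a, b]
      = (if (PySem.Int.ofStr? a).getD 0 + (PySem.Int.ofStr? b).getD 0 * 10 ≠ 0
         then pvWordsB 2 ((PySem.Int.ofStr? a).getD 0 + (PySem.Int.ofStr? b).getD 0 * 10)
         else "") := by
  unfold pvCoreB
  rw [show PySem.List.slice [a, b] none (some 3) = [a, b] from by
        rw [PySem.List.slice_to _ (by omega)]; rfl]
  norm_num [PySem.List.enumerate]

theorem pvCoreB_drop0 (a b : String) : pvCoreB [a, b, "0"] = pvCoreB [a, b] := by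
  rw [pvCoreB3, pvCoreB2, show (PySem.Int.ofStr? "0").getD 0 = 0 from by decide]
  norm_num

theorem pvCoreB_hundred (a b c : String)
    (hx0 : 0 ≤ (PySem.Int.ofStr? a).getD 0)
    (hy0 : 0 ≤ (PySem.Int.ofStr? b).getD 0)
    (h99 : (PySem.Int.ofStr? a).getD 0 + (PySem.Int.ofStr? b).getD 0 * 10 ≤ 99)
    (hz1 : 1 ≤ (PySem.Int.ofStr? c).getD 0) :
    pvCoreB [a, b, c]
      = PySem.List.pyGetD pvSmall ((PySem.Int.ofStr? c).getD 0) "" ++ " hundred " ++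
        pvCoreB [a, b] := by
  rw [pvCoreB3, pvCoreB2]
  rw [if_pos (show (PySem.Int.ofStr? a).getD 0 + (PySem.Int.ofStr? b).getD 0 * 10
        + (PySem.Int.ofStr? c).getD 0 * 100 ≠ 0 by nlinarith)]
  rw [show (PySem.Int.ofStr? a).getD 0 + (PySem.Int.ofStr? b).getD 0 * 10
        + (PySem.Int.ofStr? c).getD 0 * 100
      = ((PySem.Int.ofStr? a).getD 0 + (PySem.Int.ofStr? b).getD 0 * 10)
        + (PySem.Int.ofStr? c).getD 0 * 100 from by ring]
  rw [pvWordsB_hundred _ _ hz1 (by nlinarith) h99]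
  by_cases hnab : (PySem.Int.ofStr? a).getD 0 + (PySem.Int.ofStr? b).getD 0 * 10 = 0
  · rw [if_neg (by omega), if_neg (by omega)]
  · rw [if_pos hnab, if_pos hnab, pvWordsB_fuel _ (by omega)]

-- kernel-checked base cases: the admitted zero-, one- and two-element digit groups
theorem pvEq0 : get_partial_str [] 1 = get_partial_str_alt [] 1 := by decide

set_option maxHeartbeats 1000000 in
theorem pvKeys1Fact : ∀ a ∈ pvKeys,
    get_partial_str [a] 1 = get_partial_str_alt [a] 1 := by decide

set_option maxHeartbeats 4000000 in
theorem pvPairFact : ∀ a ∈ pvKeys, ∀ b ∈ pvDigits, (a ∈ pvDigits ∨ b = "0") →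
    get_partial_str [a, b] 1 = get_partial_str_alt [a, b] 1 ∧
    0 ≤ (PySem.Int.ofStr? a).getD 0 ∧ 0 ≤ (PySem.Int.ofStr? b).getD 0 ∧
    (PySem.Int.ofStr? a).getD 0 + (PySem.Int.ofStr? b).getD 0 * 10 ≤ 99 := by decide

theorem pvHFact : ∀ c ∈ pvHKeys,
    (c ≠ "0" → 1 ≤ (PySem.Int.ofStr? c).getD 0) ∧
    pvStrRepr.getD c "" = PySem.List.pyGetD pvSmall ((PySem.Int.ofStr? c).getD 0) "" := by
  decide

-- three admitted elements: reduce the hundreds place generically, then use the pair cases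
theorem pvEq3 (a b c : String) (ha : a ∈ pvKeys) (hb : b ∈ pvDigits)
    (hab : a ∈ pvDigits ∨ b = "0") (hc : c ∈ pvHKeys) :
    get_partial_str [a, b, c] 1 = get_partial_str_alt [a, b, c] 1 := by
  obtain ⟨h2, hx0, hy0, h99⟩ := pvPairFact a ha b hb hab
  rw [pvA_eq_core, pvB_eq_core] at h2 ⊢
  by_cases hc0 : c = "0"
  · subst hc0; rw [pvCoreA_drop0, pvCoreB_drop0]; exact h2
  · obtain ⟨hz1, hcw⟩ := pvHFact c hc
    rw [pvCoreA_hundred a b c hc0, pvCoreB_hundred a b c hx0 hy0 h99 (hz1 hc0), hcw, h2]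

-- proof-side helper: the shared count-suffix of both ports, as a function
def pvSfx (x : String) (count : Int) : String :=
  if count = 3 then (if PySem.Int.mod count 2 = 0 then x ++ " thousand, " else x) ++ " million, "
  else (if PySem.Int.mod count 2 = 0 then x ++ " thousand, " else x)

-- each port at any count is its own value at count = 1 (the bare core) plus the suffix
theorem pvA_sfx (arr : List String) (count : Int) :
    get_partial_str arr count = pvSfx (get_partial_str arr 1) count := by
  unfold get_partial_str pvSfx
  norm_num [show PySem.Int.mod 1 2 = 1 from by decide]

theorem pvB_sfx (arr : List String) (count : Int) :
    get_partial_str_alt arr count = pvSfx (get_partial_str_alt arr 1) count := by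
  unfold get_partial_str_alt pvSfx
  norm_num [show PySem.Int.mod 1 2 = 1 from by decide]


-- ===== VERDICT (by name: the statement is the Claim_ definition above) =====
theorem get_partial_str_spec : Claim_equal_get_partial_str := by
  intro arr count _ hpre
  unfold Spec_get_partial_str
  match arr, hpre with
  | [], _ =>
    rw [pvA_sfx, pvB_sfx, pvEq0]
  | [a], ⟨h1, _, _, _⟩ =>
    rw [pvA_sfx, pvB_sfx, pvKeys1Fact a (h1 a (by simp))]
  | [a, b], ⟨h1, _, h3, h4⟩ =>
    obtain ⟨h2, -, -, -⟩ := pvPairFact a (h1 a (by simp)) b (h3 b (by simp))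
      (h4.imp (fun h => h a (by simp)) (fun h => h b (by simp)))
    rw [pvA_sfx, pvB_sfx, h2]
  | a :: b :: c :: rest, ⟨h1, hh, h3, h4⟩ =>
    rw [pvA_sfx, pvB_sfx, pvA_take3, pvB_take3,
        pvEq3 a b c (h1 a (by simp)) (h3 b (by simp))
          (h4.imp (fun h => h a (by simp)) (fun h => h b (by simp)))
          (hh c (by simp))]
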